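-- pv_equiv track=rewrite | github.com/kituuu/RandomPasswordGeneratorCLI | randPass.py | fixPassword
-- ===== SOURCE A (Python) =====
-- replacement = {
--     "i":'!',
--     "a":"@",
--     "h":"#",
--     "s":'$',
--     "o":'0',
--     'e':"3",
-- }
--
-- def fixPassword(oldPass):
--     temp = ""
--     for i in range(len(oldPass)):
--         if i==0:
--             temp += oldPass[i].capitalize()
--         elif oldPass[i].lower() in replacement.keys():
--             temp += replacement[oldPass[i].lower()]
--         else:
--             temp+= oldPass[i]
--     # temp = ""
--     # for i in range(len(oldPass)):
--     #     temp+=oldPass[i]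
--     return temp
-- ===== SOURCE B (Python) =====
-- replacement = {
--     "i": '!',
--     "a": "@",
--     "h": "#",
--     "s": '$',
--     "o": '0',
--     'e': "3",
-- }
--
-- _TABLE = str.maketrans({k: v for key, v in replacement.items() for k in (key, key.upper())})
--
--
-- def fixPassword(oldPass):
--     if not oldPass:
--         return ""
--     return oldPass[0].upper() + oldPass[1:].translate(_TABLE)
-- ===== Notes on version B (the rewrite author's own statement) =====
-- stated objective: faster
-- what changed: Replaces the indexed loop with an i==0 branch and per-character dict-membership test by a first-char/rest decomposition: uppercase the first character, then one precomputed str.maketrans table (each key and its uppercase) applied via translate to the tail, moving the per-character work into C.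
import Mathlib
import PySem

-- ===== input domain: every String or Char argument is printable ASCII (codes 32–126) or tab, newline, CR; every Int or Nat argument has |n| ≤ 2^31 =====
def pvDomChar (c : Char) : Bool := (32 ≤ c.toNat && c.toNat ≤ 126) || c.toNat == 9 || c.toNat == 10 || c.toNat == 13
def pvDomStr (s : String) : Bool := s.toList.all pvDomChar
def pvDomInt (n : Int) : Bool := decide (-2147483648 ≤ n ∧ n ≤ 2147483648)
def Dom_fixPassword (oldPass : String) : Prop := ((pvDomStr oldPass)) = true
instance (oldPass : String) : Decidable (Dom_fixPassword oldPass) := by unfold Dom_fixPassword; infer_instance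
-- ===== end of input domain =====

-- B uppercases the first character and applies a single translation table to the rest,
-- instead of A's indexed loop with an i==0 branch and a dict-membership test per character.

-- ===== PORT A =====
-- the module-level replacement dict
def replacement : PySem.Dict String String :=
  ((((((PySem.Dict.empty).insert "i" "!").insert "a" "@").insert "h" "#").insert "s" "$").insert "o" "0").insert "e" "3"

-- 'oldPass[i].capitalize()' and '.lower()' on a one-char printable-ASCII string are
-- PySem.Chars.upperChar / lowerChar on that char (exact on the stated ASCII domain).
def fixPassword (oldPass : String) : String :=
  String.ofList
    ((PySem.List.pyRange 0 (oldPass.toList.length : Int) 1).foldl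
      (fun temp i =>
        if i == 0 then
          temp ++ [PySem.Chars.upperChar (PySem.List.pyGetD oldPass.toList i ' ')]
        else
          match replacement.get? (String.ofList [PySem.Chars.lowerChar (PySem.List.pyGetD oldPass.toList i ' ')]) with
          | some r => temp ++ r.toList
          | none => temp ++ [PySem.List.pyGetD oldPass.toList i ' ']) [])

-- ===== PORT B =====
-- the maketrans table: each replacement key and its uppercase, mapped to the symbol
def fixTable : List (Char × Char) :=
  [('i','!'),('I','!'),('a','@'),('A','@'),('h','#'),('H','#'),
   ('s','$'),('S','$'),('o','0'),('O','0'),('e','3'),('E','3')]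

-- str.translate: look the char up in the table, identity if absent
def fixSub (d : Char) : Char :=
  (((fixTable.find? (fun p => p.1 == d)).map Prod.snd).getD d)

def fixPassword_alt (oldPass : String) : String :=
  match oldPass.toList with
  | [] => ""
  | c :: rest => String.ofList (PySem.Chars.upperChar c :: rest.map fixSub)

-- ===== PRECONDITION & SPEC =====
def Spec_fixPassword (oldPass : String) (out : String) : Prop := out = fixPassword_alt oldPass
instance (oldPass : String) (out : String) : Decidable (Spec_fixPassword oldPass out) := by unfold Spec_fixPassword; infer_instance

-- ===== CLAIM (what is proved, stated in full; the proofs are below) =====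
def Claim_equal_fixPassword : Prop := ∀ (oldPass : String), Dom_fixPassword oldPass → Spec_fixPassword oldPass (fixPassword oldPass)


-- ===== LEMMAS AND PROOFS =====

-- A's loop body for indices i ≥ 1 (the dict-substitution step), as a named function
def gA (temp : List Char) (d : Char) : List Char :=
  temp ++ (match replacement.get? (String.ofList [PySem.Chars.lowerChar d]) with
    | some r => r.toList
    | none => [d])

-- A's per-character dict substitution agrees with B's table lookup, for every char code < 128
set_option maxRecDepth 20000 in
theorem step_eq_ofNat : ∀ n : Nat, n < 128 →
    gA [] (Char.ofNat n) = [fixSub (Char.ofNat n)] := by decide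

theorem step_eq (temp : List Char) (d : Char) (h : pvDomChar d = true) :
    gA temp d = temp ++ [fixSub d] := by
  have hn : d.toNat < 128 := by
    simp [pvDomChar] at h
    omega
  have hd : Char.ofNat d.toNat = d := Char.ofNat_toNat d
  have h0 : gA [] d = [fixSub d] := by
    rw [← hd]
    exact step_eq_ofNat d.toNat hn
  unfold gA at h0 ⊢
  rw [List.nil_append] at h0
  rw [h0]

-- ===== VERDICT (by name: the statement is the Claim_ definition above) =====
theorem fixPassword_spec : Claim_equal_fixPassword := by
  intro oldPass hdom
  unfold Spec_fixPassword fixPassword fixPassword_alt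
  have hdom' : ∀ d ∈ oldPass.toList, pvDomChar d = true := by
    have := hdom
    unfold Dom_fixPassword pvDomStr at this
    simpa [List.all_eq_true] using this
  cases h : oldPass.toList with
  | nil => rfl
  | cons c rest =>
    rw [h] at hdom'
    show String.ofList _ = String.ofList (PySem.Chars.upperChar c :: rest.map fixSub)
    have hlen : (0 : Int) < ((c :: rest).length : Int) := by simp
    rw [PySem.List.pyRange_one_cons hlen]
    simp only [List.foldl_cons]
    have hbody :
        ∀ (temp : List Char), ∀ i ∈ PySem.List.pyRange (0+1) ((c :: rest).length : Int) 1,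
          (if i == 0 then
            temp ++ [PySem.Chars.upperChar (PySem.List.pyGetD (c :: rest) i ' ')]
          else
            match replacement.get? (String.ofList [PySem.Chars.lowerChar (PySem.List.pyGetD (c :: rest) i ' ')]) with
            | some r => temp ++ r.toList
            | none => temp ++ [PySem.List.pyGetD (c :: rest) i ' ']) =
          gA temp (PySem.List.pyGetD (c :: rest) i ' ') := by
      intro temp i hi
      have h1 : (1 : Int) ≤ i := (PySem.List.mem_pyRange_one.mp hi).1
      have hne : (i == 0) = false := by
        simp
        omega
      rw [hne]
      unfold gA
      cases replacement.get? (String.ofList [PySem.Chars.lowerChar (PySem.List.pyGetD (c :: rest) i ' ')]) <;> simp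
    rw [PySem.List.foldl_congr_mem _ _ _ _ hbody]
    simp only [beq_self_eq_true, if_true, PySem.List.pyGetD_zero_cons, List.nil_append]
    rw [PySem.List.foldl_pyRange_pyGetD' (c :: rest) ' ' gA [PySem.Chars.upperChar c]
      (by omega : (0:Int) ≤ 0+1)]
    have hdrop : ((0:Int)+1).toNat = 1 := by decide
    rw [hdrop]
    simp only [List.drop_one, List.tail_cons]
    have hcongr :
        ∀ (temp : List Char), ∀ d ∈ rest, gA temp d = temp ++ [fixSub d] := by
      intro temp d hd
      exact step_eq temp d (hdom' d (by simp [hd]))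
    rw [PySem.List.foldl_congr_mem _ _ _ _ hcongr]
    rw [PySem.List.foldl_append_singleton_eq_map]
    rfl
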